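-- pv_equiv track=rewrite | github.com/MangeshM07/AlgoExpert | sweetAndSavoury.py | sweetAndSavoury
-- ===== SOURCE A (Python) =====
-- def sweetAndSavoury(dishes, target):
--     sweetDishes = sorted([dish for dish in dishes if dish < 0], key=abs)
--     savouryDishes = sorted([dish for dish in dishes if dish > 0])
--
--     bestPair = [0,0]
--     bestDifference = float('inf')
--     sweetIndex, savouryIndex = 0,0
--
--     while sweetIndex < len(sweetDishes) and savouryIndex < len(savouryDishes):
--         currentSum = sweetDishes[sweetIndex] + savouryDishes[savouryIndex]
--
--         if currentSum <= target:
--             currentDifference = target - currentSum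
--             if currentDifference < bestDifference:
--                 bestDifference = currentDifference
--                 bestPair = [sweetDishes[sweetIndex], savouryDishes[savouryIndex]]
--             savouryIndex += 1
--         else:
--             sweetIndex += 1
--     return bestPair
-- ===== SOURCE B (Python) =====
-- def sweetAndSavoury(dishes, target):
--     sweetDishes = sorted([dish for dish in dishes if dish < 0], key=abs)
--     savouryDishes = sorted([dish for dish in dishes if dish > 0])
--
--     bestPair = [0, 0]
--     bestDifference = None  # None means "no pair recorded yet"
--
--     for sweet in sweetDishes:
--         idx = bisect_right(savouryDishes, target - sweet) - 1
--         if idx >= 0: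
--             currentSum = sweet + savouryDishes[idx]
--             currentDifference = target - currentSum
--             if bestDifference is None or currentDifference < bestDifference:
--                 bestDifference = currentDifference
--                 bestPair = [sweet, savouryDishes[idx]]
--     return bestPair
--
--
-- def bisect_right(v, x):
--     lo, hi = 0, len(v)
--     while lo < hi:
--         mid = (lo + hi) // 2
--         if v[mid] <= x:
--             lo = mid + 1
--         else:
--             hi = mid
--     return lo
-- ===== Notes on version B (the rewrite author's own statement) =====
-- stated objective: alternative
-- what changed: Replaces the coupled two-pointer while-loop over both sorted lists by an independent pass over the sweet dishes that binary-searches (bisect_right) the sorted savoury list for the best partner of each sweet, updating the best pair only on strict improvement.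
import Mathlib
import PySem

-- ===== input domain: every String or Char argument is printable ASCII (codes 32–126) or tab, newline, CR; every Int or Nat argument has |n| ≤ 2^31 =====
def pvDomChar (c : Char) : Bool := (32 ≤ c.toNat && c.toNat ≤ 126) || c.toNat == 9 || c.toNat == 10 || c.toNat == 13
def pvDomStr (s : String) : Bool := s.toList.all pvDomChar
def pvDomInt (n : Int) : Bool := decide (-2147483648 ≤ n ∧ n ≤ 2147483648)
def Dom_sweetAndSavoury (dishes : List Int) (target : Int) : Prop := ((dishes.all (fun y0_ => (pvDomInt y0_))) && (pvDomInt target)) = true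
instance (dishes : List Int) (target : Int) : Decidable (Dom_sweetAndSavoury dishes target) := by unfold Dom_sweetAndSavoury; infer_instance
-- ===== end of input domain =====

-- B replaces A's coupled two-pointer scan by per-sweet binary search over the sorted savoury list
-- (alternative decomposition, same asymptotic cost; sorting dominates both).

-- ===== PORT A =====
-- Python's float('inf') best-difference is modelled as Option Int: none = inf.
-- `ltOpt x d` is Python's `x < bestDifference` where bestDifference may still be infinite/unset.
def ltOpt (x : Int) (d : Option Int) : Bool :=
  match d with
  | none => true
  | some dv => decide (x < dv)

-- the while-loop of A over (sweetIndex, savouryIndex, bestPair, bestDifference)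
def ssLoopA (S V : List Int) (t : Int) (i j : Nat) (p : List Int) (d : Option Int) : List Int :=
  if h : i < S.length ∧ j < V.length then
    let c := S[i]'h.1 + V[j]'h.2
    if c ≤ t then
      if ltOpt (t - c) d then
        ssLoopA S V t i (j+1) [S[i]'h.1, V[j]'h.2] (some (t - c))
      else
        ssLoopA S V t i (j+1) p d
    else
      ssLoopA S V t (i+1) j p d
  else p
termination_by (S.length - i) + (V.length - j)
decreasing_by all_goals omega

def sweetAndSavoury (dishes : List Int) (target : Int) : List Int :=
  let sweetDishes := PySem.List.sorted (dishes.filter (fun d => decide (d < 0))) (fun x => |x|) false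
  let savouryDishes := PySem.List.sorted (dishes.filter (fun d => decide (0 < d))) (fun x => x) false
  ssLoopA sweetDishes savouryDishes target 0 0 [0, 0] none

-- ===== PORT B =====
-- one step of B's for-loop: binary-search the savoury list for the best partner of sweet s
-- (Source B's hand-written bisect_right is the standard lo/hi halving loop = PySem.List.bisectRight)
def ssStepB (V : List Int) (t : Int) (acc : List Int × Option Int) (s : Int) : List Int × Option Int :=
  let idx : Int := (PySem.List.bisectRight V (t - s) : Int) - 1
  if 0 ≤ idx then
    let sv := V.getD idx.toNat 0
    if ltOpt (t - (s + sv)) acc.2 then ([s, sv], some (t - (s + sv))) else acc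
  else acc

def sweetAndSavoury_alt (dishes : List Int) (target : Int) : List Int :=
  let sweetDishes := PySem.List.sorted (dishes.filter (fun d => decide (d < 0))) (fun x => |x|) false
  let savouryDishes := PySem.List.sorted (dishes.filter (fun d => decide (0 < d))) (fun x => x) false
  (sweetDishes.foldl (ssStepB savouryDishes target) ([0, 0], none)).1

-- ===== PRECONDITION & SPEC =====
def Spec_sweetAndSavoury (dishes : List Int) (target : Int) (out : List Int) : Prop := out = sweetAndSavoury_alt dishes target
instance (dishes : List Int) (target : Int) (out : List Int) : Decidable (Spec_sweetAndSavoury dishes target out) := by unfold Spec_sweetAndSavoury; infer_instance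

-- ===== CLAIM (what is proved, stated in full; the proofs are below) =====
def Claim_equal_sweetAndSavoury : Prop := ∀ (dishes : List Int) (target : Int), Dom_sweetAndSavoury dishes target → Spec_sweetAndSavoury dishes target (sweetAndSavoury dishes target)

-- ===== LEMMAS AND PROOFS =====

-- monotone indexing into a ≤-sorted list
theorem getElem_mono_of_pairwise_le {V : List Int} (hV : V.Pairwise (· ≤ ·))
    {p q : Nat} (hpq : p ≤ q) (hq : q < V.length) :
    V[p]'(lt_of_le_of_lt hpq hq) ≤ V[q] := by
  rcases eq_or_lt_of_le hpq with h | h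
  · subst h; exact le_refl _
  · exact List.pairwise_iff_getElem.mp hV p q _ hq h

theorem foldl_fix {α β : Type} (f : β → α → β) (acc : β) (L : List α)
    (h : ∀ x ∈ L, f acc x = acc) : L.foldl f acc = acc := by
  induction L with
  | nil => rfl
  | cons a L ih =>
    simp only [List.foldl_cons]
    rw [h a (by simp), ih (fun x hx => h x (by simp [hx]))]

-- one B-step is the identity when the accumulated difference already beats
-- every pair this sweet can form (dv ≤ t - (s0 + V[jm]), x ≤ s0, candidates ≤ V[jm])
theorem ssStepB_fix (V : List Int) (t : Int) (hV : V.Pairwise (· ≤ ·))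
    (p : List Int) (dv : Int) (s0 x : Int) (jm : Nat) (hjm : jm < V.length)
    (hx : x ≤ s0) (hd : dv ≤ t - (s0 + V[jm]))
    (hcand : ∀ k : Nat, k < PySem.List.bisectRight V (t - x) → k ≤ jm) :
    ssStepB V t (p, some dv) x = (p, some dv) := by
  obtain ⟨r, hrdef⟩ : ∃ r, r = PySem.List.bisectRight V (t - x) := ⟨_, rfl⟩
  simp only [ssStepB, ← hrdef]
  by_cases h0 : (0 : Int) ≤ (r : Int) - 1
  · have hr1 : 1 ≤ r := by omega
    have hids : ((r : Int) - 1).toNat = r - 1 := by omega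
    have hle : r - 1 ≤ jm := hcand (r - 1) (by omega)
    have hrlt : r - 1 < V.length := lt_of_le_of_lt hle hjm
    have hsv : V.getD ((r : Int) - 1).toNat 0 = V[r-1]'hrlt := by
      rw [hids]; exact List.getD_eq_getElem V 0 hrlt
    have hmono : V[r-1]'hrlt ≤ V[jm] := getElem_mono_of_pairwise_le hV hle hjm
    have hnlt : ltOpt (t - (x + V[r-1]'hrlt)) (some dv) = false := by
      unfold ltOpt
      simp only [decide_eq_false_iff_not]
      omega
    rw [if_pos h0, hsv, hnlt]
    simp
  · rw [if_neg h0]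

-- elements at or after position i in a ≥-sorted list are bounded by S[i]
theorem drop_le_getElem {S : List Int} (hS : S.Pairwise (fun a b => b ≤ a))
    {i : Nat} (hi : i < S.length) : ∀ x ∈ S.drop i, x ≤ S[i] := by
  have hdrop := List.drop_eq_getElem_cons hi
  have hpw : (S.drop i).Pairwise (fun a b => b ≤ a) := hS.sublist (List.drop_sublist i S)
  rw [hdrop] at hpw
  intro x hx
  rw [hdrop] at hx
  rcases List.mem_cons.mp hx with h | h
  · subst h; exact le_refl _
  · exact (List.pairwise_cons.mp hpw).1 x h

-- MAIN LEMMA: A's two-pointer loop from state (i, j, p, d) equals B's fold over the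
-- remaining sweets, under the invariant that d already beats every pair a remaining
-- sweet can form with a savoury below index j.
theorem loopA_eq_fold (V : List Int) (t : Int) (hV : V.Pairwise (· ≤ ·)) :
    ∀ (n : Nat) (S : List Int) (i j : Nat) (p : List Int) (d : Option Int),
      S.length - i + (V.length - j) ≤ n →
      S.Pairwise (fun a b => b ≤ a) →
      j ≤ V.length →
      (j = 0 ∨ ∃ dv s0, d = some dv ∧ (∀ x ∈ S.drop i, x ≤ s0) ∧ dv ≤ t - (s0 + V.getD (j-1) 0)) →
      ssLoopA S V t i j p d = (List.foldl (ssStepB V t) (p, d) (S.drop i)).1 := by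
  intro n
  induction n with
  | zero =>
    intro S i j p d hn hS hj hinv
    have hiS : S.length ≤ i := by omega
    rw [ssLoopA.eq_def, dif_neg (by omega), List.drop_eq_nil_of_le hiS]
    rfl
  | succ n ih =>
    intro S i j p d hn hS hj hinv
    by_cases hiS : i < S.length
    · have hdrop := List.drop_eq_getElem_cons hiS
      by_cases hjV : j < V.length
      · -- main step
        obtain ⟨r, hrdef⟩ : ∃ r, r = PySem.List.bisectRight V (t - S[i]) := ⟨_, rfl⟩
        have hspec := PySem.List.bisectRight_spec V (t - S[i]) hV
        rw [← hrdef] at hspec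
        have hbound := drop_le_getElem hS hiS
        have hsub : S.drop (i+1) ⊆ S.drop i := by
          rw [hdrop]; exact List.subset_cons_self _ _
        rw [ssLoopA.eq_def, dif_pos ⟨hiS, hjV⟩]
        by_cases hct : S[i] + V[j] ≤ t
        · -- savoury pointer advances
          have hjr : j < r := by
            by_contra h
            have := hspec.2.2 j hjV (by omega)
            omega
          have hr1 : 1 ≤ r := by omega
          have hrm : r - 1 < V.length := by have := hspec.1; omega
          have hcle : V[j] ≤ V[r-1]'hrm := getElem_mono_of_pairwise_le hV (by omega) hrm
          have hids : ((r : Int) - 1).toNat = r - 1 := by omega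
          have hsv : V.getD ((r : Int) - 1).toNat 0 = V[r-1]'hrm := by
            rw [hids]; exact List.getD_eq_getElem V 0 hrm
          have hgd : V.getD ((j+1)-1) 0 = V[j] := by
            simpa using List.getD_eq_getElem V 0 hjV
          rw [if_pos hct]
          by_cases hup : ltOpt (t - (S[i] + V[j])) d = true
          · rw [if_pos hup]
            have hm1 : S.length - i + (V.length - (j+1)) ≤ n := by clear hinv; omega
            have hj1 : j + 1 ≤ V.length := by clear hinv; omega
            have hinv1 : (j+1) = 0 ∨ ∃ dv s0, (some (t - (S[i] + V[j])) : Option Int) = some dv ∧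
                (∀ x ∈ S.drop i, x ≤ s0) ∧ dv ≤ t - (s0 + V.getD ((j+1)-1) 0) :=
              Or.inr ⟨t - (S[i] + V[j]), S[i], rfl, hbound, by rw [hgd]; exact le_rfl⟩
            have hIH := ih S i (j+1) [S[i], V[j]] (some (t - (S[i] + V[j]))) hm1 hS hj1 hinv1
            -- the first B-step from (p,d) equals the one from the updated accumulator
            have hstep : ssStepB V t (p, d) S[i] =
                ssStepB V t ([S[i], V[j]], some (t - (S[i] + V[j]))) S[i] := by
              have h0 : (0 : Int) ≤ (r : Int) - 1 := by omega
              have hlt : ltOpt (t - (S[i] + V[r-1]'hrm)) d = true := by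
                unfold ltOpt at hup ⊢
                cases d with
                | none => rfl
                | some dv => simp only [decide_eq_true_eq] at hup ⊢; omega
              simp only [ssStepB, ← hrdef]
              rw [if_pos h0, if_pos h0, hsv, hlt, if_pos rfl]
              by_cases hstrict : V[j] < V[r-1]'hrm
              · have : ltOpt (t - (S[i] + V[r-1]'hrm)) (some (t - (S[i] + V[j]))) = true := by
                  unfold ltOpt; simp only [decide_eq_true_eq]; omega
                rw [this, if_pos rfl]
              · have heq : V[r-1]'hrm = V[j] := by omega
                have : ltOpt (t - (S[i] + V[r-1]'hrm)) (some (t - (S[i] + V[j]))) = false := by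
                  unfold ltOpt; simp only [decide_eq_false_iff_not]; omega
                rw [this]
                simp [heq]
            have hfold : (List.foldl (ssStepB V t) (p, d) (S.drop i)).1
                = (List.foldl (ssStepB V t) ([S[i], V[j]], some (t - (S[i] + V[j]))) (S.drop i)).1 := by
              rw [hdrop]
              simp only [List.foldl_cons]
              rw [hstep]
            rw [hfold]
            exact hIH
          · rw [if_neg hup]
            have hdv : ∃ dv, d = some dv ∧ ¬ (t - (S[i] + V[j]) < dv) := by
              unfold ltOpt at hup
              cases d with
              | none => simp at hup
              | some dv => exact ⟨dv, rfl, by simpa using hup⟩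
            obtain ⟨dv, hdeq, hnlt⟩ := hdv
            subst hdeq
            have hm1 : S.length - i + (V.length - (j+1)) ≤ n := by clear hinv; omega
            have hj1 : j + 1 ≤ V.length := by clear hinv; omega
            have hinv1 : (j+1) = 0 ∨ ∃ dv' s0, (some dv : Option Int) = some dv' ∧
                (∀ x ∈ S.drop i, x ≤ s0) ∧ dv' ≤ t - (s0 + V.getD ((j+1)-1) 0) :=
              Or.inr ⟨dv, S[i], rfl, hbound, by rw [hgd]; omega⟩
            exact ih S i (j+1) p (some dv) hm1 hS hj1 hinv1
        · -- sweet pointer advances; this sweet's B-step is a no-op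
          rw [if_neg hct]
          have hrj : r ≤ j := by
            by_contra h
            have := hspec.2.1 j hjV (by omega)
            omega
          have hinv' : j = 0 ∨ ∃ dv s0, d = some dv ∧ (∀ x ∈ S.drop (i+1), x ≤ s0) ∧
              dv ≤ t - (s0 + V.getD (j-1) 0) := by
            rcases hinv with h | ⟨dv, s0, hdeq, hb, hd⟩
            · exact Or.inl h
            · exact Or.inr ⟨dv, s0, hdeq, fun x hx => hb x (hsub hx), hd⟩
          have hm2 : S.length - (i+1) + (V.length - j) ≤ n := by clear hinv hinv'; omega
          have hIH := ih S (i+1) j p d hm2 hS hj hinv'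
          have hstep : ssStepB V t (p, d) S[i] = (p, d) := by
            by_cases hr0 : r = 0
            · simp only [ssStepB, ← hrdef, hr0]
              norm_num
            · have hj0 : 0 < j := by omega
              rcases hinv with h | ⟨dv, s0, hdeq, hb, hd⟩
              · omega
              · subst hdeq
                have hjm : j - 1 < V.length := by omega
                have hgd : V.getD (j-1) 0 = V[j-1]'hjm := List.getD_eq_getElem V 0 hjm
                rw [hgd] at hd
                exact ssStepB_fix V t hV p dv s0 S[i] (j-1) hjm
                  (hb S[i] (by rw [hdrop]; exact List.mem_cons_self ..))
                  hd (fun k hk => by rw [← hrdef] at hk; omega)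
          have hfold : (List.foldl (ssStepB V t) (p, d) (S.drop i)).1
              = (List.foldl (ssStepB V t) (p, d) (S.drop (i+1))).1 := by
            rw [hdrop]
            simp only [List.foldl_cons]
            rw [hstep]
          rw [hfold]
          exact hIH
      · -- j has reached the end of the savoury list: everything left is a no-op
        rw [ssLoopA.eq_def, dif_neg (by omega)]
        rcases hinv with h | ⟨dv, s0, hdeq, hb, hd⟩
        · -- then V is empty: every bisect returns 0
          have hV0 : V.length = 0 := by omega
          have hfix : ∀ x ∈ S.drop i, ssStepB V t (p, d) x = (p, d) := by
            intro x hx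
            have hr0 : PySem.List.bisectRight V (t - x) = 0 := by
              have := (PySem.List.bisectRight_spec V (t - x) hV).1
              omega
            simp only [ssStepB, hr0]
            norm_num
          rw [foldl_fix _ _ _ hfix]
        · subst hdeq
          by_cases hV0 : V.length = 0
          · have hfix : ∀ x ∈ S.drop i, ssStepB V t (p, some dv) x = (p, some dv) := by
              intro x hx
              have hr0 : PySem.List.bisectRight V (t - x) = 0 := by
                have := (PySem.List.bisectRight_spec V (t - x) hV).1
                omega
              simp only [ssStepB, hr0]
              norm_num
            rw [foldl_fix _ _ _ hfix]
          · have hjm : j - 1 < V.length := by omega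
            have hgd : V.getD (j-1) 0 = V[j-1]'hjm := List.getD_eq_getElem V 0 hjm
            rw [hgd] at hd
            have hfix : ∀ x ∈ S.drop i, ssStepB V t (p, some dv) x = (p, some dv) := by
              intro x hx
              refine ssStepB_fix V t hV p dv s0 x (j-1) hjm (hb x hx) hd ?_
              intro k hk
              have := (PySem.List.bisectRight_spec V (t - x) hV).1
              omega
            rw [foldl_fix _ _ _ hfix]
    · rw [ssLoopA.eq_def, dif_neg (by omega), List.drop_eq_nil_of_le (by omega)]
      rfl

-- ===== VERDICT (by name: the statement is the Claim_ definition above) =====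
theorem sweetAndSavoury_spec : Claim_equal_sweetAndSavoury := by
  intro dishes target _
  unfold Spec_sweetAndSavoury sweetAndSavoury sweetAndSavoury_alt
  simp only []
  set S := PySem.List.sorted (dishes.filter (fun d => decide (d < 0))) (fun x => |x|) false with hSdef
  set V := PySem.List.sorted (dishes.filter (fun d => decide (0 < d))) (fun x => x) false with hVdef
  have hV : V.Pairwise (· ≤ ·) := by
    have := PySem.List.sorted_pairwise (dishes.filter (fun d => decide (0 < d))) (fun x => x)
    simpa using this
  have hS : S.Pairwise (fun a b => b ≤ a) := by
    have hpw := PySem.List.sorted_pairwise (dishes.filter (fun d => decide (d < 0))) (fun x => |x|)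
    have hneg : ∀ x ∈ S, x < 0 := by
      intro x hx
      rw [hSdef, PySem.List.mem_sorted] at hx
      have := List.of_mem_filter hx
      simpa using this
    refine List.Pairwise.imp_of_mem ?_ hpw
    intro a b ha hb hab
    have ha' := hneg a ha
    have hb' := hneg b hb
    rw [abs_of_neg ha', abs_of_neg hb'] at hab
    omega
  have key := loopA_eq_fold V target hV (S.length + V.length) S 0 0 [0,0] none
    (by omega) hS (by omega) (Or.inl rfl)
  rw [List.drop_zero] at key
  exact key
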